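-- pv_equiv track=rewrite | github.com/Saarts21/deobfus_text | src/splitter.py | split_string_to_substrings
-- ===== SOURCE A (Python) =====
-- MAX_SUBSTRING_LENGTH = 3
--
-- def split_string_to_substrings(str):
--     """
--     Generates all possible splits of str with substrings of up to length max_substring_length.
--     Returns a list of lists, where each inner list represents a possible split of str.
--     """
--     def backtrack(index, path):
--         if index == len(str):
--             result.append(path[:])
--             return
--
--         for length in range(1, MAX_SUBSTRING_LENGTH + 1):
--             if index + length <= len(str):
--                 backtrack(index + length, path + [str[index:index + length]])
--
--     result = []
--     backtrack(0, [])
--     return result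
-- ===== SOURCE B (Python) =====
-- MAX_SUBSTRING_LENGTH = 3
--
-- def split_string_to_substrings(str):
--     """Same result as A, but iterative bottom-up dynamic programming over suffixes:
--     dp[i] holds every split of str[i:], filled from i = n down to 0; no recursion,
--     no shared mutable result list."""
--     n = len(str)
--     dp = [None] * (n + 1)
--     dp[n] = [[]]
--     for i in range(n - 1, -1, -1):
--         dp[i] = [[str[i:i + L]] + tail
--                  for L in range(1, MAX_SUBSTRING_LENGTH + 1) if i + L <= n
--                  for tail in dp[i + L]]
--     return dp[0]
-- ===== Notes on version B (the rewrite author's own statement) =====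
-- stated objective: alternative
-- what changed: Replaced recursive backtracking into a shared mutable result list with an iterative bottom-up dynamic-programming table dp[i] of all splits of the suffix str[i:], filled from n down to 0 and read off at dp[0].
import Mathlib
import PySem

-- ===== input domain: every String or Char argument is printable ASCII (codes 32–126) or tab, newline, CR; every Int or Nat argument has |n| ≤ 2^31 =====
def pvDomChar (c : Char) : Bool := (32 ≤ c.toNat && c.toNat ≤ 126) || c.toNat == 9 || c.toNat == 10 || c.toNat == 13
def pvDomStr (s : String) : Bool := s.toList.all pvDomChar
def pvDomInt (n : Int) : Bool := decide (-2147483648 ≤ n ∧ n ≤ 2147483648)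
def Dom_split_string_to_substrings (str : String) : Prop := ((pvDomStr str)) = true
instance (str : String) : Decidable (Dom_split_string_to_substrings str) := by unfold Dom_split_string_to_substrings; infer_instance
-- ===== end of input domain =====

-- B replaces A's recursive backtracking (shared result list, path accumulator) with an
-- iterative bottom-up DP table of splits per suffix; objective: alternative decomposition.

-- ===== PORT A =====
-- str[index:index+length] on a list of chars (slice with in-range nonneg bounds)
def pvPiece (cs : List Char) (index length : Nat) : String :=
  String.ofList ((cs.drop index).take length)

-- A's backtrack(index, path): the for-loop over range(1, MAX_SUBSTRING_LENGTH+1) = [1,2,3]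
-- is unrolled (the bound is a module constant); result-list appends become list concatenation
-- in the same order.
def pvBacktrackA (cs : List Char) (index : Nat) (path : List String) : List (List String) :=
  if index = cs.length then [path]
  else
    (if index + 1 ≤ cs.length then pvBacktrackA cs (index + 1) (path ++ [pvPiece cs index 1]) else []) ++
    (if index + 2 ≤ cs.length then pvBacktrackA cs (index + 2) (path ++ [pvPiece cs index 2]) else []) ++
    (if index + 3 ≤ cs.length then pvBacktrackA cs (index + 3) (path ++ [pvPiece cs index 3]) else [])
  termination_by cs.length - index
  decreasing_by all_goals omega

def split_string_to_substrings (str : String) : List (List String) :=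
  pvBacktrackA str.toList 0 []

-- ===== PORT B =====
-- One DP row: dp[i] computed from the rows already built, acc = [dp[i+1], …, dp[n]],
-- so dp[i+L] is acc.getD (L-1). The comprehension order (L ascending, then tails) is kept.
def pvRowB (cs : List Char) (i : Nat) (acc : List (List (List String))) : List (List String) :=
  (([1, 2, 3].filter (fun L => i + L ≤ cs.length)).flatMap
    (fun L => (acc.getD (L - 1) []).map
      (fun tail => String.ofList ((cs.drop i).take L) :: tail)))

-- B fills the table from i = n-1 down to 0 (foldr over range n visits indices descending),
-- each step prepending the new row dp[i]; dp[0] is the head of the finished table.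
def split_string_to_substrings_alt (str : String) : List (List String) :=
  ((List.range str.toList.length).foldr
      (fun i acc => pvRowB str.toList i acc :: acc) [[[]]]).headD []

-- ===== PRECONDITION & SPEC =====
def Spec_split_string_to_substrings (str : String) (out : List (List String)) : Prop := out = split_string_to_substrings_alt str
instance (str : String) (out : List (List String)) : Decidable (Spec_split_string_to_substrings str out) := by unfold Spec_split_string_to_substrings; infer_instance

-- ===== CLAIM (what is proved, stated in full; the proofs are below) =====
def Claim_equal_split_string_to_substrings : Prop := ∀ (str : String), Dom_split_string_to_substrings str → Spec_split_string_to_substrings str (split_string_to_substrings str)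

-- ===== LEMMAS AND PROOFS =====

-- Ghost reference recursion: all splits of the suffix cs[i:].
def pvSplitsG (cs : List Char) (i : Nat) : List (List String) :=
  if i = cs.length then [[]]
  else
    (if i + 1 ≤ cs.length then (pvSplitsG cs (i + 1)).map (fun t => pvPiece cs i 1 :: t) else []) ++
    (if i + 2 ≤ cs.length then (pvSplitsG cs (i + 2)).map (fun t => pvPiece cs i 2 :: t) else []) ++
    (if i + 3 ≤ cs.length then (pvSplitsG cs (i + 3)).map (fun t => pvPiece cs i 3 :: t) else [])
  termination_by cs.length - i
  decreasing_by all_goals omega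

-- A's backtrack equals the ghost recursion with the path prepended.
theorem pvBacktrackA_eq_map (n : Nat) :
    ∀ (cs : List Char) (index : Nat) (path : List String), cs.length - index ≤ n →
      pvBacktrackA cs index path = (pvSplitsG cs index).map (fun t => path ++ t) := by
  induction n with
  | zero =>
    intro cs index path h
    rw [pvBacktrackA, pvSplitsG]
    by_cases hi : index = cs.length
    · simp [hi]
    · have h1 : ¬ index + 1 ≤ cs.length := by omega
      have h2 : ¬ index + 2 ≤ cs.length := by omega
      have h3 : ¬ index + 3 ≤ cs.length := by omega
      simp [hi, h1, h2, h3]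
  | succ n ih =>
    intro cs index path h
    rw [pvBacktrackA, pvSplitsG]
    by_cases hi : index = cs.length
    · simp [hi]
    · have br : ∀ k : Nat, 1 ≤ k → k ≤ 3 →
          (if index + k ≤ cs.length then pvBacktrackA cs (index + k) (path ++ [pvPiece cs index k]) else [])
            = List.map (fun t => path ++ t)
              (if index + k ≤ cs.length then
                (pvSplitsG cs (index + k)).map (fun tail => pvPiece cs index k :: tail) else []) := by
        intro k hk1 hk3
        by_cases hk : index + k ≤ cs.length
        · rw [if_pos hk, if_pos hk, ih cs (index + k) _ (by omega), List.map_map]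
          apply List.map_congr_left
          intro t _
          simp
        · simp [hk]
      simp only [if_neg hi, List.map_append]
      rw [br 1 (by omega) (by omega), br 2 (by omega) (by omega), br 3 (by omega) (by omega)]

-- B's row on the suffix table of ghost values produces the ghost value dp[i].
theorem pvRowB_ghost (cs : List Char) (i k : Nat) (hik : i + (k + 1) = cs.length) :
    pvRowB cs i ((List.range' (i + 1) (k + 1)).map (pvSplitsG cs)) = pvSplitsG cs i := by
  have hi : i ≠ cs.length := by omega
  have h1 : i + 1 ≤ cs.length := by omega
  rw [pvSplitsG, if_neg hi, pvRowB]
  have hget : ∀ L : Nat, i + L ≤ cs.length → 1 ≤ L →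
      ((List.range' (i + 1) (k + 1)).map (pvSplitsG cs)).getD (L - 1) [] = pvSplitsG cs (i + L) := by
    intro L hL hL1
    have hlt : L - 1 < k + 1 := by omega
    rw [List.getD_eq_getElem?_getD, List.getElem?_map, List.getElem?_range' (by omega)]
    simp only [Option.map_some, Option.getD_some]
    congr 1
    omega
  by_cases h2 : i + 2 ≤ cs.length <;> by_cases h3 : i + 3 ≤ cs.length
  all_goals
    (simp only [List.filter, h1, h2, h3, decide_true, decide_false, List.flatMap_cons,
        List.flatMap_nil, List.append_nil]
     try rw [hget 1 h1 (by omega)]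
     try rw [hget 2 h2 (by omega)]
     try rw [hget 3 h3 (by omega)]
     simp [pvPiece])

-- The foldr builds exactly the table [dp[i], …, dp[n]] of ghost values.
theorem pvFoldr_table (cs : List Char) :
    ∀ (k i : Nat), i + k = cs.length →
      (List.range' i k).foldr (fun j acc => pvRowB cs j acc :: acc) [[[]]]
        = (List.range' i (k + 1)).map (pvSplitsG cs) := by
  intro k
  induction k with
  | zero =>
    intro i h
    have hi : i = cs.length := by omega
    subst hi
    simp only [List.range', List.map, List.foldr]
    rw [pvSplitsG]
    simp
  | succ k ih =>
    intro i h
    rw [List.range'_succ, List.foldr_cons, ih (i + 1) (by omega)]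
    rw [pvRowB_ghost cs i k h]
    rw [List.range'_succ, List.map_cons, List.range'_succ, List.map_cons]
    rw [List.range'_succ, List.map_cons]

-- ===== VERDICT (by name: the statement is the Claim_ definition above) =====
theorem split_string_to_substrings_spec : Claim_equal_split_string_to_substrings := by
  intro str _
  unfold Spec_split_string_to_substrings split_string_to_substrings split_string_to_substrings_alt
  rw [pvBacktrackA_eq_map str.toList.length str.toList 0 [] (by omega)]
  rw [List.range_eq_range']
  rw [pvFoldr_table str.toList str.toList.length 0 (by omega), List.range'_succ, List.map_cons]
  simp
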